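-- pv_equiv track=rewrite | github.com/Hoony0321/Algorithm | 2023_04/30/programmers_12953.py | solution
-- ===== SOURCE A (Python) =====
-- def solution(arr):
--     MAX = max(arr)
--
--     while True:
--         cnt = 0
--         MAX += 1
--
--         for a in arr:
--             if MAX%a == 0:
--                 cnt += 1
--         if cnt == len(arr):
--             break
--     return MAX
-- ===== SOURCE B (Python) =====
-- def _gcd(a, b):
--     a, b = abs(a), abs(b)
--     while b:
--         a, b = b, a % b
--     return a
--
--
-- def solution(arr):
--     M = max(arr)
--     L = 1
--     for a in arr:
--         L = L * a // _gcd(L, a)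
--     L = abs(L)
--     return L * (M // L + 1)
-- ===== Notes on version B (the rewrite author's own statement) =====
-- stated objective: faster
-- what changed: Replaces the candidate-by-candidate search above max(arr) that tests every number against all elements by a gcd-fold computing the LCM and the closed form L*(M//L+1); intended as asymptotically faster (a timing run could not take a clean ratio because A already timed out at n=16 where B returned).
-- outside the precondition, e.g. on solution([]): A raises ValueError, B raises ValueError; on solution([0]): A raises ZeroDivisionError, B raises ZeroDivisionError
import Mathlib
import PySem

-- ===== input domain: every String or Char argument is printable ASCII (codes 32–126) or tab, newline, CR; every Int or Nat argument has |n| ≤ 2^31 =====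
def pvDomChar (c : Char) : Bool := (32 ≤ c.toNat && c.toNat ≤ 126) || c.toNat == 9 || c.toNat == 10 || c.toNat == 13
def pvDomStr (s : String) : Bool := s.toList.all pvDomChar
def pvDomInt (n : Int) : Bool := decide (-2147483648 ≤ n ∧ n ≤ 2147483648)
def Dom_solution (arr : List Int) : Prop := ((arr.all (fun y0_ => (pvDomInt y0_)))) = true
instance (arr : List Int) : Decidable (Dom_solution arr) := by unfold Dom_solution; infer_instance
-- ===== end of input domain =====

-- B replaces A's candidate-by-candidate search above max(arr) by an LCM fold and a closed-form
-- smallest-strictly-greater multiple (intended as faster; a timing run saw A time out at n=16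
-- where B returned, so no ratio could be measured).

-- ===== PORT A =====
-- fuel for the unbounded `while True`: the lcm of the elements bounds the number of steps
-- (fuel only makes the loop total; under Pre_ the loop always breaks before fuel runs out)
def solFuel (arr : List Int) : Nat := arr.foldl (fun acc a => Int.lcm (acc : Int) a) 1

def solGo (arr : List Int) : Nat → Int → Int
  | 0, m => m
  | f + 1, m =>
    let m' := m + 1
    let cnt : Int := arr.foldl (fun c a => if PySem.Int.mod m' a = 0 then c + 1 else c) 0
    if cnt = (arr.length : Int) then m' else solGo arr f m'

def solution (arr : List Int) : Int :=
  match PySem.List.max? arr (fun x => x) with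
  | none => 0  -- max([]) raises ValueError in Python; excluded by Pre_
  | some M => solGo arr (solFuel arr) M

-- ===== PORT B =====
def bGcd (a b : Nat) : Nat :=
  if h : b = 0 then a else bGcd b (a % b)
decreasing_by exact Nat.mod_lt _ (Nat.pos_of_ne_zero h)

def solution_alt (arr : List Int) : Int :=
  match PySem.List.max? arr (fun x => x) with
  | none => 0  -- max([]) raises in Python; excluded by Pre_
  | some M =>
    let L := arr.foldl (fun L a => PySem.Int.floordiv (L * a) ((bGcd L.natAbs a.natAbs : Nat) : Int)) 1
    let L' := |L|
    L' * (PySem.Int.floordiv M L' + 1)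

-- ===== PRECONDITION & SPEC =====
-- Pre_ excludes exactly the inputs on which A raises: max([]) raises ValueError on the empty
-- list, and a 0 element makes `MAX % a` raise ZeroDivisionError.
def Pre_solution (arr : List Int) : Prop := arr ≠ [] ∧ (0 : Int) ∉ arr
instance (arr : List Int) : Decidable (Pre_solution arr) := by unfold Pre_solution; infer_instance
def pvWitness_solution : List Int := [2, 6, 8, 14]

def Spec_solution (arr : List Int) (out : Int) : Prop := out = solution_alt arr
instance (arr : List Int) (out : Int) : Decidable (Spec_solution arr out) := by unfold Spec_solution; infer_instance

-- ===== CLAIM (what is proved, stated in full; the proofs are below) =====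
def Claim_equal_solution : Prop := ∀ (arr : List Int), Dom_solution arr → Pre_solution arr → Spec_solution arr (solution arr)

-- ===== LEMMAS AND PROOFS =====

theorem bGcd_eq (a b : Nat) : bGcd a b = Nat.gcd a b := by
  induction b using Nat.strong_induction_on generalizing a with
  | _ b ih =>
    rw [bGcd]
    split
    · simp [*]
    · rename_i h
      rw [ih _ (Nat.mod_lt _ (Nat.pos_of_ne_zero h)), Nat.gcd_comm a b, Nat.gcd_rec b a,
        Nat.gcd_comm b (a % b)]

-- the Nat-level lcm fold both ports' folds are related to
def lcmFold (arr : List Int) (n : Nat) : Nat := arr.foldl (fun n a => Nat.lcm n a.natAbs) n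

theorem foldl_intLcm (arr : List Int) (n : Nat) :
    arr.foldl (fun acc a => Int.lcm (acc : Int) a) n = lcmFold arr n := by
  induction arr generalizing n with
  | nil => rfl
  | cons a t ih =>
    simp only [List.foldl_cons, lcmFold] at *
    rw [show Int.lcm (n : Int) a = Nat.lcm n a.natAbs by simp [Int.lcm], ih]

theorem solFuel_eq (arr : List Int) : solFuel arr = lcmFold arr 1 :=
  foldl_intLcm arr 1

theorem lcmFold_pos (arr : List Int) (n : Nat) (hn : n ≠ 0) (h : ∀ a ∈ arr, a ≠ 0) :
    lcmFold arr n ≠ 0 := by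
  induction arr generalizing n with
  | nil => exact hn
  | cons a t ih =>
    simp only [lcmFold, List.foldl_cons]
    refine ih _ ?_ (fun x hx => h x (List.mem_cons_of_mem a hx))
    have ha : a ≠ 0 := h a (List.mem_cons_self ..)
    simp [hn, Int.natAbs_eq_zero, ha]

theorem natCast_dvd_iff (n : Nat) (m : Int) : (n : Int) ∣ m ↔ n ∣ m.natAbs := by
  rw [← Int.dvd_natAbs, Int.natCast_dvd_natCast]

theorem lcmFold_dvd_iff (arr : List Int) (n : Nat) (m : Int) (h : ∀ a ∈ arr, a ≠ 0) :
    ((lcmFold arr n : Nat) : Int) ∣ m ↔ ((n : Int) ∣ m ∧ ∀ a ∈ arr, a ∣ m) := by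
  induction arr generalizing n with
  | nil => simp [lcmFold]
  | cons a t ih =>
    simp only [lcmFold, List.foldl_cons] at *
    rw [ih _ (fun x hx => h x (List.mem_cons_of_mem a hx))]
    have h1 : ((Nat.lcm n a.natAbs : Nat) : Int) ∣ m ↔ Nat.lcm n a.natAbs ∣ m.natAbs :=
      natCast_dvd_iff _ _
    constructor
    · rintro ⟨hl, ht⟩
      rw [h1, Nat.lcm_dvd_iff] at hl
      refine ⟨(natCast_dvd_iff ..).mpr hl.1, fun x hx => ?_⟩
      rcases List.mem_cons.mp hx with rfl | hx
      · exact Int.natAbs_dvd_natAbs.mp hl.2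
      · exact ht x hx
    · rintro ⟨hn, hall⟩
      refine ⟨?_, fun x hx => hall x (List.mem_cons_of_mem a hx)⟩
      rw [h1, Nat.lcm_dvd_iff]
      exact ⟨(natCast_dvd_iff _ _).mp hn,
        Int.natAbs_dvd_natAbs.mpr (hall a (List.mem_cons_self ..))⟩

theorem altFold (arr : List Int) (acc : Int) (hacc : acc ≠ 0) (h : ∀ a ∈ arr, a ≠ 0) :
    (arr.foldl (fun L a => PySem.Int.floordiv (L * a) ((bGcd L.natAbs a.natAbs : Nat) : Int)) acc) ≠ 0 ∧
    (arr.foldl (fun L a => PySem.Int.floordiv (L * a) ((bGcd L.natAbs a.natAbs : Nat) : Int)) acc).natAbs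
      = lcmFold arr acc.natAbs := by
  induction arr generalizing acc with
  | nil => exact ⟨hacc, rfl⟩
  | cons a t ih =>
    have ha : a ≠ 0 := h a (List.mem_cons_self ..)
    have hg : bGcd acc.natAbs a.natAbs = Nat.gcd acc.natAbs a.natAbs := bGcd_eq ..
    have hg0 : Nat.gcd acc.natAbs a.natAbs ≠ 0 := by
      simp [Nat.gcd_eq_zero_iff, Int.natAbs_eq_zero, hacc]
    have hgpos : (0:Int) < ((Nat.gcd acc.natAbs a.natAbs : Nat) : Int) := by
      exact_mod_cast Nat.pos_of_ne_zero hg0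
    have hdvd : ((Nat.gcd acc.natAbs a.natAbs : Nat) : Int) ∣ acc * a :=
      dvd_mul_of_dvd_left ((natCast_dvd_iff _ _).mpr (Nat.gcd_dvd_left ..)) a
    obtain ⟨q, hq⟩ := hdvd
    have hstep : PySem.Int.floordiv (acc * a) ((bGcd acc.natAbs a.natAbs : Nat) : Int) = q := by
      rw [hg, PySem.Int.floordiv_eq_ediv_of_pos hgpos, hq,
        Int.mul_ediv_cancel_left _ (by exact_mod_cast hg0)]
    have hq0 : q ≠ 0 := by
      intro h0
      exact mul_ne_zero hacc ha (by simpa [h0] using hq)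
    have hqabs : q.natAbs = Nat.lcm acc.natAbs a.natAbs := by
      have : acc.natAbs * a.natAbs = Nat.gcd acc.natAbs a.natAbs * q.natAbs := by
        have := congrArg Int.natAbs hq
        simpa [Int.natAbs_mul] using this
      have : (acc.natAbs * a.natAbs) / Nat.gcd acc.natAbs a.natAbs = q.natAbs := by
        rw [this, Nat.mul_div_cancel_left _ (Nat.pos_of_ne_zero hg0)]
      simpa [Nat.lcm] using this.symm
    simp only [List.foldl_cons, hstep]
    have := ih q hq0 (fun x hx => h x (List.mem_cons_of_mem a hx))
    refine ⟨this.1, ?_⟩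
    rw [this.2, hqabs]
    rfl

theorem cntFold (arr : List Int) (x : Int) (c : Int) :
    arr.foldl (fun c a => if PySem.Int.mod x a = 0 then c + 1 else c) c
      = c + (arr.countP (fun a => decide (PySem.Int.mod x a = 0)) : Int) := by
  induction arr generalizing c with
  | nil => simp
  | cons a t ih =>
    by_cases hm : PySem.Int.mod x a = 0 <;>
      simp [hm, ih] <;> omega

theorem cnt_iff (arr : List Int) (x : Int) :
    (arr.foldl (fun c a => if PySem.Int.mod x a = 0 then c + 1 else c) (0:Int) = (arr.length : Int))
      ↔ ∀ a ∈ arr, a ∣ x := by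
  rw [cntFold, zero_add, Nat.cast_inj, List.countP_eq_length]
  simp [PySem.Int.mod_eq_zero_iff_dvd]

theorem goFind (arr : List Int) (Lint : Int)
    (hP : ∀ x : Int,
      (arr.foldl (fun c a => if PySem.Int.mod x a = 0 then c + 1 else c) (0:Int) = (arr.length : Int))
        ↔ Lint ∣ x) :
    ∀ (fuel : Nat) (m target : Int), Lint ∣ target → m < target → target ≤ m + fuel →
      (∀ k, m < k → k < target → ¬ Lint ∣ k) → solGo arr fuel m = target := by
  intro fuel
  induction fuel with
  | zero => intro m target _ h1 h2 _; omega
  | succ f ih =>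
    intro m target hdvd h1 h2 hgap
    simp only [solGo]
    split_ifs with hc
    · by_contra hne
      have : m + 1 < target := by omega
      exact hgap (m + 1) (by omega) this ((hP (m + 1)).mp hc)
    · have hnd : ¬ Lint ∣ (m + 1) := fun hd => hc ((hP (m + 1)).mpr hd)
      have hlt : m + 1 < target := by
        rcases lt_or_eq_of_le (show m + 1 ≤ target by omega) with h | h
        · exact h
        · exact absurd (h ▸ hdvd) hnd
      exact ih (m + 1) target hdvd hlt (by push_cast at h2 ⊢; omega)
        (fun k hk1 hk2 => hgap k (by omega) hk2)

-- ===== VERDICT (by name: the statement is the Claim_ definition above) =====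
theorem solution_spec : Claim_equal_solution := by
  unfold Claim_equal_solution
  intro arr _ hpre
  obtain ⟨hne, hz⟩ := hpre
  have hnz : ∀ a ∈ arr, a ≠ 0 := fun a ha h0 => hz (h0 ▸ ha)
  unfold Spec_solution solution solution_alt
  cases hmax : PySem.List.max? arr (fun x => x) with
  | none => exact absurd ((PySem.List.max?_eq_none_iff ..).mp hmax) hne
  | some M =>
    simp only
    have hN0 : lcmFold arr 1 ≠ 0 := lcmFold_pos arr 1 one_ne_zero hnz
    have hLpos : (0:Int) < ((lcmFold arr 1 : Nat) : Int) := by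
      exact_mod_cast Nat.pos_of_ne_zero hN0
    obtain ⟨hF0, hFabs⟩ := altFold arr 1 one_ne_zero hnz
    have habs : |arr.foldl (fun L a => PySem.Int.floordiv (L * a) ((bGcd L.natAbs a.natAbs : Nat) : Int)) 1|
        = ((lcmFold arr 1 : Nat) : Int) := by
      rw [Int.abs_eq_natAbs, hFabs]; norm_num
    rw [habs, PySem.Int.floordiv_eq_ediv_of_pos hLpos, solFuel_eq]
    set Lint : Int := ((lcmFold arr 1 : Nat) : Int) with hLdef
    set q : Int := M / Lint with hqdef
    set r : Int := M % Lint with hrdef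
    have heq : Lint * q + r = M := Int.mul_ediv_add_emod M Lint
    have hr0 : 0 ≤ r := Int.emod_nonneg M (by omega)
    have hr1 : r < Lint := Int.emod_lt_of_pos M hLpos
    have htgt : Lint * (q + 1) = Lint * q + Lint := by ring
    apply goFind arr Lint
    · intro x
      rw [cnt_iff]
      rw [lcmFold_dvd_iff arr 1 x hnz]
      simp
    · exact dvd_mul_right ..
    · omega
    · omega
    · rintro k hk1 hk2 ⟨j, hj⟩
      subst hj
      have hq_lt : q < j := by
        have : Lint * q < Lint * j := by omega
        exact lt_of_mul_lt_mul_left this hLpos.le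
      have hj_lt : j < q + 1 := by
        have : Lint * j < Lint * (q + 1) := by omega
        exact lt_of_mul_lt_mul_left this hLpos.le
      omega
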